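-- pv_equiv track=rewrite | github.com/vanum9461/Python_Programs | prac.py | akash
-- ===== SOURCE A (Python) =====
-- def akash(n):
--     if(n<=0):
--         return 0
--
--     else:
--         c= n%10+akash(n//10)
--         su=c%10+c//10
--         """su=0
--         while(c>0):
--             rev=c%10
--             su+=rev
--             c=c//10"""
--         return(su)
-- ===== SOURCE B (Python) =====
-- def akash(n):
--     if n <= 0:
--         return 0
--     digits = []
--     while n > 0:
--         digits.append(n % 10)
--         n //= 10
--     acc = 0
--     for d in reversed(digits):
--         c = d + acc
--         acc = c % 10 + c // 10
--     return acc
-- ===== Notes on version B (the rewrite author's own statement) =====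
-- stated objective: alternative
-- what changed: Replaces A's linear recursion with an explicit two-phase iteration: extract the digits by repeated mod/floordiv into a list, then fold the same carry-folding recurrence over the digits most-significant-first with an accumulator.
import Mathlib
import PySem

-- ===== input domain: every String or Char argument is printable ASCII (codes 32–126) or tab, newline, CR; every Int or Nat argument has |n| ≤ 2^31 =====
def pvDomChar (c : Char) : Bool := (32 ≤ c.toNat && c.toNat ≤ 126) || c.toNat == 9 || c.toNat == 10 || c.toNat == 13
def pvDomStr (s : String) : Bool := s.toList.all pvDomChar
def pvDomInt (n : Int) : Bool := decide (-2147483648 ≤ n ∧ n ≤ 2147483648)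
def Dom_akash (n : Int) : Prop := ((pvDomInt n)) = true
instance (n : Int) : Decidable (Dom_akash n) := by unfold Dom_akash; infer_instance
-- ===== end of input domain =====

-- B replaces A's linear recursion by an explicit iterative digit-list fold of the same recurrence; return values agree on all ints.
-- ===== PORT A =====
def akash (n : Int) : Int :=
  if n ≤ 0 then 0
  else
    let c := PySem.Int.mod n 10 + akash (PySem.Int.floordiv n 10)
    PySem.Int.mod c 10 + PySem.Int.floordiv c 10
termination_by n.toNat
decreasing_by
  rename_i h
  rw [PySem.Int.floordiv_eq_ediv_of_pos (by norm_num)]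
  omega

-- ===== PORT B =====
-- while n > 0: digits.append(n % 10); n //= 10
def akashDigits (n : Int) : List Int :=
  if n > 0 then PySem.Int.mod n 10 :: akashDigits (PySem.Int.floordiv n 10)
  else []
termination_by n.toNat
decreasing_by
  rename_i h
  rw [PySem.Int.floordiv_eq_ediv_of_pos (by norm_num)]
  omega

def akash_alt (n : Int) : Int :=
  if n ≤ 0 then 0
  else
    (akashDigits n).reverse.foldl
      (fun acc d => let c := d + acc; PySem.Int.mod c 10 + PySem.Int.floordiv c 10) 0

-- ===== PRECONDITION & SPEC =====
def Spec_akash (n : Int) (out : Int) : Prop := out = akash_alt n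
instance (n : Int) (out : Int) : Decidable (Spec_akash n out) := by unfold Spec_akash; infer_instance

-- ===== CLAIM (what is proved, stated in full; the proofs are below) =====
def Claim_equal_akash : Prop := ∀ (n : Int), Dom_akash n → Spec_akash n (akash n)

-- ===== LEMMAS AND PROOFS =====
theorem akash_fold (n : Int) :
    (akashDigits n).reverse.foldl
      (fun acc d => let c := d + acc; PySem.Int.mod c 10 + PySem.Int.floordiv c 10) 0
      = akash n := by
  by_cases h0 : 0 < n
  · induction hk : n.toNat using Nat.strong_induction_on generalizing n with
    | _ k ih =>
      rw [akashDigits, if_pos h0, List.reverse_cons, List.foldl_append]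
      by_cases h1 : 0 < PySem.Int.floordiv n 10
      · rw [ih (PySem.Int.floordiv n 10).toNat
            (by subst hk
                rw [PySem.Int.floordiv_eq_ediv_of_pos (by norm_num)] at h1 ⊢
                omega)
            _ h1 rfl]
        simp only [List.foldl]
        conv_rhs => rw [akash, if_neg (by omega)]
      · have hd : akashDigits (PySem.Int.floordiv n 10) = [] := by
          rw [akashDigits, if_neg h1]
        have ha : akash (PySem.Int.floordiv n 10) = 0 := by
          rw [akash, if_pos (by omega)]
        rw [hd]
        conv_rhs => rw [akash, if_neg (by omega)]
        rw [ha]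
        simp [List.foldl]
  · rw [akashDigits, if_neg h0]
    rw [akash, if_pos (by omega)]
    simp

-- ===== VERDICT (by name: the statement is the Claim_ definition above) =====
theorem akash_spec : Claim_equal_akash := by
  intro n _
  unfold Spec_akash akash_alt
  by_cases h : n ≤ 0
  · rw [if_pos h, akash, if_pos h]
  · rw [if_neg h, akash_fold]
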